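-- pv_equiv track=rewrite | github.com/juniormj/Junosapp-FastAPI-NuxJS | backend/lib/utils.py | verify_port
-- ===== SOURCE A (Python) =====
-- from typing import Dict, List
--
-- def verify_port(ports: List[int]):
--     list_ports: List[int] = []
--     PORTA_ONU: int = 0
--     PORTA_ROUTER: int = 0
--
--     ionu = [i for i in ports if i == 80 or i == 443 or i == 50320]
--     try:
--         PORTA_ONU = ionu[0]
--     except IndexError:
--         PORTA_ONU = 0
--     list_ports.append(PORTA_ONU)
--     irouter = [i for i in ports if i == 50330]
--     try:
--         PORTA_ROUTER = irouter[0]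
--     except IndexError:
--         PORTA_ROUTER = 0
--     list_ports.append(PORTA_ROUTER)
--
--     return list_ports
-- ===== SOURCE B (Python) =====
-- def verify_port(ports):
--     porta_onu = 0
--     porta_router = 0
--     for i in ports:
--         if porta_onu == 0 and i in (80, 443, 50320):
--             porta_onu = i
--         if porta_router == 0 and i == 50330:
--             porta_router = i
--         if porta_onu != 0 and porta_router != 0:
--             break
--     return [porta_onu, porta_router]
-- ===== Notes on version B (the rewrite author's own statement) =====
-- stated objective: alternative
-- what changed: Replaced A's two full filter passes (each building an intermediate list and taking its head) with a single early-exit loop maintaining both results and breaking once both are found.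
import Mathlib
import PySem

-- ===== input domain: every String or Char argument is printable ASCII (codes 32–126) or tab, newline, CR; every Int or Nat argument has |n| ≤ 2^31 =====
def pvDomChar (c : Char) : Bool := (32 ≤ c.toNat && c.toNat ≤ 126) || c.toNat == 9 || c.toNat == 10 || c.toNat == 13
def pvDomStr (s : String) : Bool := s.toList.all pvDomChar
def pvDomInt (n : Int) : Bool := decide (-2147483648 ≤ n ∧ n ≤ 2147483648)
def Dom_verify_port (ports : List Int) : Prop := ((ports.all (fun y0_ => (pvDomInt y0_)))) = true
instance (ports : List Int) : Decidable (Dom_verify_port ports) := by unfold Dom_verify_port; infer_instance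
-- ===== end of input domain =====

-- B replaces A's two full filter passes with one early-exit loop tracking both ports; alternative decomposition, same cost.


-- ===== PORT A =====
-- ionu[0] with except IndexError -> 0 is ported as a match on the filtered list.
def verify_port (ports : List Int) : List Int :=
  let ionu := ports.filter (fun i => i == 80 || i == 443 || i == 50320)
  let PORTA_ONU : Int := match ionu with | [] => 0 | x :: _ => x
  let irouter := ports.filter (fun i => i == 50330)
  let PORTA_ROUTER : Int := match irouter with | [] => 0 | x :: _ => x
  [PORTA_ONU, PORTA_ROUTER]

-- ===== PORT B =====
-- single-pass loop with early break once both ports are found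
def verify_port_altLoop : List Int → Int → Int → List Int
  | [], porta_onu, porta_router => [porta_onu, porta_router]
  | i :: rest, porta_onu, porta_router =>
    let porta_onu' := if porta_onu == 0 && (i == 80 || i == 443 || i == 50320) then i else porta_onu
    let porta_router' := if porta_router == 0 && i == 50330 then i else porta_router
    if porta_onu' != 0 && porta_router' != 0 then [porta_onu', porta_router']
    else verify_port_altLoop rest porta_onu' porta_router'

def verify_port_alt (ports : List Int) : List Int :=
  verify_port_altLoop ports 0 0

-- ===== PRECONDITION & SPEC =====
def Spec_verify_port (ports : List Int) (out : List Int) : Prop := out = verify_port_alt ports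
instance (ports : List Int) (out : List Int) : Decidable (Spec_verify_port ports out) := by unfold Spec_verify_port; infer_instance

-- ===== CLAIM (what is proved, stated in full; the proofs are below) =====
def Claim_equal_verify_port : Prop := ∀ (ports : List Int), Dom_verify_port ports → Spec_verify_port ports (verify_port ports)

-- ===== LEMMAS AND PROOFS =====

theorem verify_port_altLoop_eq (ports : List Int) : ∀ (o r : Int),
    verify_port_altLoop ports o r =
      [if o = 0 then (ports.find? (fun i => i == 80 || i == 443 || i == 50320)).getD 0 else o,
       if r = 0 then (ports.find? (fun i => i == 50330)).getD 0 else r] := by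
  induction ports with
  | nil => intro o r; simp [verify_port_altLoop]
  | cons i rest ih =>
    intro o r
    simp only [verify_port_altLoop]
    by_cases ho : o = 0 <;> by_cases hr : r = 0 <;>
      by_cases h80 : i = (80 : Int) <;> by_cases h443 : i = (443 : Int) <;>
      by_cases h320 : i = (50320 : Int) <;> by_cases h330 : i = (50330 : Int) <;>
      simp [ho, hr, h80, h443, h320, h330, ih, List.find?, Bool.beq_eq_decide_eq]

theorem match_filter_eq_find (p : Int → Bool) (l : List Int) :
    (match l.filter p with | [] => (0 : Int) | x :: _ => x) = (l.find? p).getD 0 := by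
  induction l with
  | nil => simp [List.filter, List.find?]
  | cons a t ih =>
    by_cases h : p a = true <;> simp [List.filter, List.find?, h, ih]

-- ===== VERDICT (by name: the statement is the Claim_ definition above) =====
theorem verify_port_spec : Claim_equal_verify_port := by
  intro ports _
  unfold Spec_verify_port verify_port verify_port_alt
  rw [verify_port_altLoop_eq]
  simp [match_filter_eq_find]
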